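-- pv_equiv track=rewrite | github.com/MauriceelHelou/healthsystems | backend/config/schema_config.py | domains_to_category
-- ===== SOURCE A (Python) =====
-- from typing import Dict, List, Literal, TypedDict
--
-- CATEGORY_TO_DOMAIN_MAPPING: Dict[str, List[str]] = {
--     "built_environment": ["housing", "built_environment_transportation", "environmental_climate"],
--     "social_environment": ["social_environment"],
--     "economic": ["economic_security", "employment_occupational"],
--     "political": ["civic_political_engagement"],
--     "biological": ["specialized_clinical"],
--     "behavioral": ["behavioral_health"],
--     "healthcare_access": ["healthcare_system"],
-- }
--
-- def domains_to_category(domains: List[str]) -> str: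
--     """
--     Map domains back to the best-matching deprecated category.
--
--     Used for backward compatibility during migration.
--
--     Args:
--         domains: List of domain values
--
--     Returns:
--         Best matching old category value
--     """
--     if not domains:
--         return "behavioral"  # Default
--
--     # Reverse the mapping
--     domain_to_category = {}
--     for cat, dom_list in CATEGORY_TO_DOMAIN_MAPPING.items():
--         for d in dom_list:
--             domain_to_category[d] = cat
--
--     # Return the first matching category
--     for domain in domains:
--         if domain in domain_to_category:
--             return domain_to_category[domain]
--
--     return "behavioral"  # Default fallback
-- ===== SOURCE B (Python) =====
-- CATEGORY_TO_DOMAIN_MAPPING = {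
--     "built_environment": ["housing", "built_environment_transportation", "environmental_climate"],
--     "social_environment": ["social_environment"],
--     "economic": ["economic_security", "employment_occupational"],
--     "political": ["civic_political_engagement"],
--     "biological": ["specialized_clinical"],
--     "behavioral": ["behavioral_health"],
--     "healthcare_access": ["healthcare_system"],
-- }
--
-- def domains_to_category(domains):
--     for domain in domains:
--         for cat, dom_list in CATEGORY_TO_DOMAIN_MAPPING.items():
--             if domain in dom_list:
--                 return cat
--     return "behavioral"
-- ===== Notes on version B (the rewrite author's own statement) =====
-- stated objective: simpler
-- what changed: Drops the reverse-index construction and the empty-list guard: B scans the input domains directly against the category->domains table, returning the first category whose domain list contains the domain, defaulting to 'behavioral'.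
import Mathlib
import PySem

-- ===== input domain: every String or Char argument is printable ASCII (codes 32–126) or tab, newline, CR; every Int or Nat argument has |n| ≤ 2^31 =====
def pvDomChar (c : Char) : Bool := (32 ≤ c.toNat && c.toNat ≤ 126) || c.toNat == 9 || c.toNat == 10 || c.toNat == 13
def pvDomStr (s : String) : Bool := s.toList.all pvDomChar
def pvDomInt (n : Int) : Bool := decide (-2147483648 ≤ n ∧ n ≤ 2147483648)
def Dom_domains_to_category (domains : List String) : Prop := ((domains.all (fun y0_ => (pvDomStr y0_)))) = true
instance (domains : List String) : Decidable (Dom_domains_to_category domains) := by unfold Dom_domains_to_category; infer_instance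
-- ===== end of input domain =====

-- B drops A's reverse-index build and empty-list guard: it scans the input domains directly
-- against the category→domains table (simpler; same results since the table's domain lists are disjoint).


-- ===== PORT A =====
-- the module constant CATEGORY_TO_DOMAIN_MAPPING, in insertion order
def pvCatMap : List (String × List String) :=
  [("built_environment", ["housing", "built_environment_transportation", "environmental_climate"]),
   ("social_environment", ["social_environment"]),
   ("economic", ["economic_security", "employment_occupational"]),
   ("political", ["civic_political_engagement"]),
   ("biological", ["specialized_clinical"]),
   ("behavioral", ["behavioral_health"]),
   ("healthcare_access", ["healthcare_system"])]

-- the reverse map A builds: for cat, dom_list in items: for d in dom_list: domain_to_category[d] = cat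
def pvReverseMap : PySem.Dict String String :=
  pvCatMap.foldl (fun acc p => p.2.foldl (fun acc d => acc.insert d p.1) acc) PySem.Dict.empty

-- 'for domain in domains: if domain in domain_to_category: return domain_to_category[domain]'
def pvALoop (d2c : PySem.Dict String String) : List String → String
  | [] => "behavioral"
  | d :: rest =>
    match d2c.get? d with
    | some c => c
    | none => pvALoop d2c rest

def domains_to_category (domains : List String) : String :=
  if domains = [] then "behavioral"
  else pvALoop pvReverseMap domains

-- ===== PORT B =====
-- inner loop: first category whose domain list contains d
def pvBLookup (d : String) : Option String :=
  pvCatMap.findSome? (fun p => if p.2.contains d then some p.1 else none)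

def domains_to_category_alt : List String → String
  | [] => "behavioral"
  | d :: rest =>
    match pvBLookup d with
    | some c => c
    | none => domains_to_category_alt rest

-- ===== PRECONDITION & SPEC =====
def Spec_domains_to_category (domains : List String) (out : String) : Prop := out = domains_to_category_alt domains
instance (domains : List String) (out : String) : Decidable (Spec_domains_to_category domains out) := by unfold Spec_domains_to_category; infer_instance

-- ===== CLAIM (what is proved, stated in full; the proofs are below) =====
def Claim_equal_domains_to_category : Prop := ∀ (domains : List String), Dom_domains_to_category domains → Spec_domains_to_category domains (domains_to_category domains)

-- ===== LEMMAS AND PROOFS =====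

-- A's reverse map looks up the same category B's direct scan finds
theorem lookup_eq (d : String) : pvReverseMap.get? d = pvBLookup d := by
  by_cases h1 : d = "housing"; · subst h1; decide
  by_cases h2 : d = "built_environment_transportation"; · subst h2; decide
  by_cases h3 : d = "environmental_climate"; · subst h3; decide
  by_cases h4 : d = "social_environment"; · subst h4; decide
  by_cases h5 : d = "economic_security"; · subst h5; decide
  by_cases h6 : d = "employment_occupational"; · subst h6; decide
  by_cases h7 : d = "civic_political_engagement"; · subst h7; decide
  by_cases h8 : d = "specialized_clinical"; · subst h8; decide
  by_cases h9 : d = "behavioral_health"; · subst h9; decide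
  by_cases h10 : d = "healthcare_system"; · subst h10; decide
  have hmk : pvReverseMap = PySem.Dict.mk
      [("housing", "built_environment"), ("built_environment_transportation", "built_environment"),
       ("environmental_climate", "built_environment"), ("social_environment", "social_environment"),
       ("economic_security", "economic"), ("employment_occupational", "economic"),
       ("civic_political_engagement", "political"), ("specialized_clinical", "biological"),
       ("behavioral_health", "behavioral"), ("healthcare_system", "healthcare_access")] := by decide
  rw [hmk]
  simp only [PySem.Dict.get?_mk_cons, pvBLookup, pvCatMap, List.findSome?_cons,
    List.contains_cons, List.contains_nil, beq_iff_eq, Bool.or_false]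
  simp [Ne.symm h1, Ne.symm h2, Ne.symm h3, Ne.symm h4, Ne.symm h5, Ne.symm h6,
        Ne.symm h7, Ne.symm h8, Ne.symm h9, Ne.symm h10, h1, h2, h3, h4, h5, h6, h7, h8, h9, h10,
        PySem.Dict.get?]

theorem loop_eq (l : List String) : pvALoop pvReverseMap l = domains_to_category_alt l := by
  induction l with
  | nil => rfl
  | cons d rest ih =>
    simp only [pvALoop, domains_to_category_alt, lookup_eq d]
    cases pvBLookup d <;> simp [ih]

-- ===== VERDICT (by name: the statement is the Claim_ definition above) =====
theorem domains_to_category_spec : Claim_equal_domains_to_category := by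
  intro domains _
  unfold Spec_domains_to_category domains_to_category
  split
  · subst ‹domains = []›; rfl
  · exact loop_eq domains
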